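-- pv_equiv track=rewrite | github.com/alliance-genome/agr_literature_service | agr_literature_service/api/crud/ateam_db_helpers.py | classify_entity_list
-- ===== SOURCE A (Python) =====
-- curie_prefix_list = ["FB", "MGI", "RGD", "SGD", "WB", "XenBase", "ZFIN"]
--
-- def classify_entity_list(entity_list):
--     """Split a raw entity_list string into separate lists for names and curies."""
--     entity_name_list = []
--     entity_curie_list = []
--
--     # Example: if entity_list is "MGI:1234|ACT1|SGD:S00001"
--     # then "MGI:1234" and "SGD:S00001" go into entity_curie_list,
--     # while "ACT1" goes into entity_name_list.
--     for entity in entity_list.split("|"):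
--         is_mod_curie = False
--         for curie_prefix in curie_prefix_list:
--             if entity.startswith(curie_prefix + ":"):
--                 is_mod_curie = True
--                 break
--         if is_mod_curie:
--             entity_curie_list.append(entity.upper())
--         else:
--             entity_name_list.append(entity.upper())
--
--     return entity_name_list, entity_curie_list
-- ===== SOURCE B (Python) =====
-- CURIE_PREFIXES = frozenset(["FB", "MGI", "RGD", "SGD", "WB", "XenBase", "ZFIN"])
--
--
-- def classify_entity_list(entity_list):
--     """Split a raw entity_list string into separate lists for names and curies.
--
--     Single character-level scan: tokens are accumulated char by char (no split()),
--     and a token's curie-ness is decided the moment its first ':' is seen, by one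
--     set lookup on the prefix accumulated so far. A trailing '|' sentinel flushes
--     the last token.
--     """
--     entity_name_list = []
--     entity_curie_list = []
--     token = []        # chars of the current token
--     is_curie = None   # None = no ':' seen yet in this token
--     for ch in entity_list + "|":
--         if ch == "|":
--             word = "".join(token).upper()
--             (entity_curie_list if is_curie else entity_name_list).append(word)
--             token = []
--             is_curie = None
--         else:
--             if ch == ":" and is_curie is None:
--                 is_curie = "".join(token) in CURIE_PREFIXES
--             token.append(ch)
--     return entity_name_list, entity_curie_list
-- ===== Notes on version B (the rewrite author's own statement) =====
-- stated objective: alternative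
-- what changed: Replaces A's split-then-classify (split('|') plus an inner per-prefix startswith scan per token) with a single character-level state machine: one pass over the string with a sentinel '|', accumulating the current token and deciding curie-ness on the fly at the first ':' via one set lookup.
import Mathlib
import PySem

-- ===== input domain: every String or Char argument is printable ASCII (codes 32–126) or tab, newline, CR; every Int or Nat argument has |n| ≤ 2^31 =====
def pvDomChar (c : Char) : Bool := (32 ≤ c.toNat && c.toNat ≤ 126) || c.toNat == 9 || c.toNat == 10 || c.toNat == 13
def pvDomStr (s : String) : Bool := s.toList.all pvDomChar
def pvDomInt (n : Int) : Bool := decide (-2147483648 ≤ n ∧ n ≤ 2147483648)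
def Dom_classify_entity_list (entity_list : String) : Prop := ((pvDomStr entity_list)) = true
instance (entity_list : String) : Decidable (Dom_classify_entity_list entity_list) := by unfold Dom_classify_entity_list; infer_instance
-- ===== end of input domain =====

-- B replaces A's split-then-classify (split('|') + per-prefix startswith scan) by a single
-- character-level state machine with a '|' sentinel (objective: alternative).

-- ===== PORT A =====
def pvCuriePrefixList : List String := ["FB", "MGI", "RGD", "SGD", "WB", "XenBase", "ZFIN"]

-- the inner loop: 'for curie_prefix in curie_prefix_list: if entity.startswith(curie_prefix + ":"): is_mod_curie = True; break'
def pvIsModCurie : List String → String → Bool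
  | [], _ => false
  | p :: ps, e => if PySem.Chars.startswith e.toList (p.toList ++ [':']) then true else pvIsModCurie ps e

def classify_entity_list (entity_list : String) : List String × List String :=
  -- entity_list.split("|") via PySem.Chars.splitOn (separator nonempty: exact)
  ((PySem.Chars.splitOn entity_list.toList ['|']).map String.ofList).foldl
    (fun (acc : List String × List String) entity =>
      if pvIsModCurie pvCuriePrefixList entity then (acc.1, acc.2 ++ [PySem.Str.upper entity])
      else (acc.1 ++ [PySem.Str.upper entity], acc.2))
    ([], [])

-- ===== PORT B =====
def pvCurieSet : PySem.Set String := PySem.Set.ofList ["FB", "MGI", "RGD", "SGD", "WB", "XenBase", "ZFIN"]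

-- the state machine of Source B: (names, curies, current token chars, is_curie : Option Bool)
def pvScan : List Char → List String → List String → List Char → Option Bool → List String × List String
  | [], names, curies, _, _ => (names, curies)
  | c :: cs, names, curies, token, isC =>
    if c = '|' then
      -- flush: '(entity_curie_list if is_curie else entity_name_list).append(word)'
      let word := PySem.Str.upper (String.ofList token)
      match isC with
      | some true => pvScan cs names (curies ++ [word]) [] none
      | _ => pvScan cs (names ++ [word]) curies [] none
    else
      let isC' := if c = ':' ∧ isC = none
                  then some (PySem.Set.contains pvCurieSet (String.ofList token))
                  else isC
      pvScan cs names curies (token ++ [c]) isC'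

def classify_entity_list_alt (entity_list : String) : List String × List String :=
  -- 'for ch in entity_list + "|"' with the flush-on-'|' sentinel
  pvScan (entity_list.toList ++ ['|']) [] [] [] none

-- ===== PRECONDITION & SPEC =====
def Spec_classify_entity_list (entity_list : String) (out : List String × List String) : Prop := out = classify_entity_list_alt entity_list
instance (entity_list : String) (out : List String × List String) : Decidable (Spec_classify_entity_list entity_list out) := by unfold Spec_classify_entity_list; infer_instance

-- ===== CLAIM (what is proved, stated in full; the proofs are below) =====
def Claim_equal_classify_entity_list : Prop := ∀ (entity_list : String), Dom_classify_entity_list entity_list → Spec_classify_entity_list entity_list (classify_entity_list entity_list)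

-- ===== LEMMAS AND PROOFS =====

-- proof-side per-token classification (B's set test, phrased on the whole token)
def pvIsCurie (e : String) : Bool :=
  let cs := e.toList
  e.toList.contains ':' && PySem.Set.contains pvCurieSet (String.ofList (cs.takeWhile (fun c => c != ':')))

-- proof-side split on '|' (structural recursion; related to PySem.Chars.splitOn below)
def pvMySplit (pre : List Char) : List Char → List (List Char)
  | [] => [pre]
  | c :: cs => if c = '|' then pre :: pvMySplit [] cs else pvMySplit (pre ++ [c]) cs

-- a token starts with p ++ ":" (p colon-free) iff its part before the first ':' is p and it has a ':'
theorem pv_prefix_colon (cs : List Char) (p : List Char) (hp : ':' ∉ p) :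
    (p ++ [':'] <+: cs) ↔ (cs.takeWhile (fun c => c != ':') = p ∧ ':' ∈ cs) := by
  induction cs generalizing p with
  | nil => simp
  | cons c cs ih =>
      cases p with
      | nil =>
          by_cases hc : c = ':'
          · subst hc; simp
          · simp [hc, Ne.symm hc, List.cons_prefix_cons]
      | cons q p' =>
          have hq : q ≠ ':' := fun h => hp (h ▸ List.mem_cons_self ..)
          have hp' : ':' ∉ p' := fun h => hp (List.mem_cons_of_mem _ h)
          by_cases hcq : c = q
          · subst hcq
            simp [List.cons_prefix_cons, ih p' hp', List.mem_cons, hq, Ne.symm hq]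
          · by_cases hc : c = ':'
            · subst hc
              simp [List.cons_prefix_cons, Ne.symm hcq]
            · simp [List.cons_prefix_cons, hc, hcq, Ne.symm hcq]

theorem pv_startswith_colon (e : String) (p : String) (hp : ':' ∉ p.toList) :
    PySem.Chars.startswith e.toList (p.toList ++ [':'])
      = ((e.toList.takeWhile (fun c => c != ':') == p.toList) && e.toList.contains ':') := by
  rw [Bool.eq_iff_iff]
  simp [PySem.Chars.startswith_iff, pv_prefix_colon _ _ hp]

-- the two per-token classifications agree
theorem pv_isCurie_eq (e : String) : pvIsModCurie pvCuriePrefixList e = pvIsCurie e := by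
  have h := fun (p : String) hp => pv_startswith_colon e p hp
  simp only [pvIsModCurie, pvCuriePrefixList,
    h "FB" (by decide), h "MGI" (by decide), h "RGD" (by decide), h "SGD" (by decide),
    h "WB" (by decide), h "XenBase" (by decide), h "ZFIN" (by decide)]
  simp only [pvIsCurie, pvCurieSet, PySem.Set.contains, PySem.Set.ofList]
  cases hc : e.toList.contains ':' <;>
    simp [String.ext_iff, Bool.or_comm]

-- PySem.Chars.splitOn.go with enough fuel computes pvMySplit
theorem pv_go_eq (l : List Char) (fuel : Nat) (cur : List Char) (acc : List (List Char))
    (hf : l.length < fuel) :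
    PySem.Chars.splitOn.go ['|'] fuel l cur acc = acc.reverse ++ pvMySplit cur.reverse l := by
  induction l generalizing fuel cur acc with
  | nil =>
      cases fuel with
      | zero => omega
      | succ f => simp [PySem.Chars.splitOn.go, pvMySplit]
  | cons c cs ih =>
      cases fuel with
      | zero => omega
      | succ f =>
          have hf' : cs.length < f := by simpa using hf
          by_cases hc : c = '|'
          · subst hc
            rw [PySem.Chars.splitOn.go]
            simp only [List.isPrefixOf]
            simp [ih _ _ _ hf', pvMySplit]
          · rw [PySem.Chars.splitOn.go]
            have : (['|'].isPrefixOf (c :: cs)) = false := by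
              simp [List.isPrefixOf, hc, Ne.symm hc]
            simp only [this, Bool.false_eq_true, if_false]
            rw [ih _ _ _ hf']
            simp [pvMySplit, hc, Ne.symm hc]

theorem pv_splitOn_eq (cs : List Char) :
    PySem.Chars.splitOn cs ['|'] = pvMySplit [] cs := by
  rw [PySem.Chars.splitOn]
  simpa using pv_go_eq cs (cs.length + 1) [] [] (by omega)

-- takeWhile over an append: stops inside t if t contains ':', runs on if not
theorem pv_tw_stop (t l : List Char) (h : ':' ∈ t) :
    (t ++ l).takeWhile (fun c => c != ':') = t.takeWhile (fun c => c != ':') := by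
  induction t with
  | nil => simp at h
  | cons a t ih =>
      by_cases ha : a = ':'
      · subst ha; simp
      · have h' : ':' ∈ t := by
          rcases List.mem_cons.mp h with h1 | h1
          · exact absurd h1.symm ha
          · exact h1
        simp [List.takeWhile_cons, ha, Ne.symm ha, ih h']

theorem pv_tw_all (t l : List Char) (h : ':' ∉ t) :
    (t ++ l).takeWhile (fun c => c != ':') = t ++ l.takeWhile (fun c => c != ':') := by
  induction t with
  | nil => simp
  | cons a t ih =>
      have ha : a ≠ ':' := fun hh => h (hh ▸ List.mem_cons_self ..)
      have h' : ':' ∉ t := fun hh => h (List.mem_cons_of_mem _ hh)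
      simp [List.takeWhile_cons, ha, Ne.symm ha, ih h']

-- the invariant the scanner keeps about the current token
def pvInv (token : List Char) (isC : Option Bool) : Prop :=
  isC = (if ':' ∈ token
         then some (PySem.Set.contains pvCurieSet (String.ofList (token.takeWhile (fun c => c != ':'))))
         else none)

-- one flush step, as A's fold performs it (with the shared per-token test)
def pvStep (acc : List String × List String) (e : String) : List String × List String :=
  if pvIsCurie e then (acc.1, acc.2 ++ [PySem.Str.upper e]) else (acc.1 ++ [PySem.Str.upper e], acc.2)

theorem pv_isCurie_ofList (token : List Char) :
    pvIsCurie (String.ofList token)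
      = (decide (':' ∈ token)
          && PySem.Set.contains pvCurieSet (String.ofList (token.takeWhile (fun c => c != ':')))) := by
  simp [pvIsCurie]

-- the scanner over cs ++ ['|'] equals the fold of pvStep over the tokens of token ++ cs
theorem pv_scan_eq (cs : List Char) (names curies : List String) (token : List Char)
    (isC : Option Bool) (hinv : pvInv token isC) :
    pvScan (cs ++ ['|']) names curies token isC
      = ((pvMySplit token cs).map String.ofList).foldl pvStep (names, curies) := by
  induction cs generalizing names curies token isC with
  | nil =>
      rw [hinv]
      by_cases hmem : ':' ∈ token
      · rw [if_pos hmem]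
        cases hset : PySem.Set.contains pvCurieSet
            (String.ofList (token.takeWhile (fun c => c != ':'))) <;>
          · simp [pvScan, pvMySplit, pvStep, pv_isCurie_ofList, hmem, hset]
            simpa using hset
      · rw [if_neg hmem]
        simp [pvScan, pvMySplit, pvStep, pv_isCurie_ofList, hmem]
  | cons c cs ih =>
      by_cases hc : c = '|'
      · subst hc
        rw [hinv]
        have hrest := ih (token := []) (isC := none) (hinv := by simp [pvInv])
        by_cases hmem : ':' ∈ token
        · rw [if_pos hmem]
          cases hset : PySem.Set.contains pvCurieSet
              (String.ofList (token.takeWhile (fun c => c != ':'))) with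
          | false =>
              simp only [List.cons_append, pvScan, if_pos rfl]
              rw [hrest]
              simp [pvMySplit, pvStep, pv_isCurie_ofList, hmem, hset]
              rw [if_neg (by simpa using hset)]
          | true =>
              simp only [List.cons_append, pvScan, if_pos rfl]
              rw [hrest]
              simp [pvMySplit, pvStep, pv_isCurie_ofList, hmem, hset]
              rw [if_pos (by simpa using hset)]
        · rw [if_neg hmem]
          simp only [List.cons_append, pvScan, if_pos rfl]
          rw [hrest]
          simp [pvMySplit, pvStep, pv_isCurie_ofList, hmem]
      · have hstep : pvScan ((c :: cs) ++ ['|']) names curies token isC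
            = pvScan (cs ++ ['|']) names curies (token ++ [c])
                (if c = ':' ∧ isC = none
                 then some (PySem.Set.contains pvCurieSet (String.ofList token))
                 else isC) := by
          simp [pvScan, hc]
        have hinv' : pvInv (token ++ [c])
            (if c = ':' ∧ isC = none
             then some (PySem.Set.contains pvCurieSet (String.ofList token))
             else isC) := by
          unfold pvInv at hinv ⊢
          by_cases hcol : c = ':'
          · subst hcol
            by_cases hmem : ':' ∈ token
            · have hne : isC ≠ none := by rw [hinv]; simp [hmem]
              rw [pv_tw_stop token [':'] hmem]
              simp [hne, hinv, hmem]
            · have hn : isC = none := by rw [hinv]; simp [hmem]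
              rw [pv_tw_all token [':'] hmem]
              simp [hn, hmem]
          · have hmemiff : ':' ∈ token ++ [c] ↔ ':' ∈ token := by
              simp [Ne.symm hcol]
            by_cases hmem : ':' ∈ token
            · rw [pv_tw_stop token [c] hmem]
              simp [hcol, hinv, hmem, hmemiff]
            · simp [hcol, hinv, hmem, hmemiff]
        rw [hstep, ih _ _ _ _ hinv']
        simp [pvMySplit, hc]

-- ===== VERDICT (by name: the statement is the Claim_ definition above) =====
theorem classify_entity_list_spec : Claim_equal_classify_entity_list := by
  intro s _
  show classify_entity_list s = classify_entity_list_alt s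
  unfold classify_entity_list classify_entity_list_alt
  rw [pv_splitOn_eq, pv_scan_eq s.toList [] [] [] none (by simp [pvInv])]
  have hfun : (fun (acc : List String × List String) entity =>
      if pvIsModCurie pvCuriePrefixList entity then (acc.1, acc.2 ++ [PySem.Str.upper entity])
      else (acc.1 ++ [PySem.Str.upper entity], acc.2)) = pvStep := by
    funext acc e
    rw [pv_isCurie_eq]
    rfl
  rw [hfun]
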